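-- pv_equiv track=rewrite | github.com/Ella-Ksenofontova/leak-finder | find_shift.py | find_shift
-- ===== SOURCE A (Python) =====
-- def find_shift(array_1, array_2):
--     shift = 0
--     while shift < len(array_1):
--         start_index = len(array_1) - shift
--         modified_array_2 = array_2[start_index:] + array_2[:start_index]
--         if array_1 == modified_array_2:
--             return shift
--
--         shift += 1
--
--     return -1
-- ===== SOURCE B (Python) =====
-- def find_shift(array_1, array_2):
--     # KMP: search array_1 in array_2 + array_2, keep the LAST occurrence start p
--     # (the smallest shift is n - p); O(n) instead of A's O(n^2) rotation rebuilds.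
--     n = len(array_1)
--     if n == 0 or len(array_2) != n:
--         return -1
--     fail = [0] * n
--     k = 0
--     for i in range(1, n):
--         while k > 0 and array_1[i] != array_1[k]:
--             k = fail[k - 1]
--         if array_1[i] == array_1[k]:
--             k += 1
--         fail[i] = k
--     last = -1
--     j = 0
--     for i, x in enumerate(array_2 + array_2):
--         while j > 0 and x != array_1[j]:
--             j = fail[j - 1]
--         if x == array_1[j]:
--             j += 1
--         if j == n:
--             last = i - n + 1
--             j = fail[n - 1]
--     return n - last if last != -1 else -1
-- ===== Notes on version B (the rewrite author's own statement) =====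
-- stated objective: faster
-- what changed: B replaces A's per-shift rotation rebuild-and-compare (two slices + concatenation + full list comparison for every shift) with a KMP search: it builds the failure table of array_1, scans array_2 + array_2 once keeping the last occurrence start p, and returns n - p (guarding length mismatch and empty input up front).
import Mathlib
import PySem

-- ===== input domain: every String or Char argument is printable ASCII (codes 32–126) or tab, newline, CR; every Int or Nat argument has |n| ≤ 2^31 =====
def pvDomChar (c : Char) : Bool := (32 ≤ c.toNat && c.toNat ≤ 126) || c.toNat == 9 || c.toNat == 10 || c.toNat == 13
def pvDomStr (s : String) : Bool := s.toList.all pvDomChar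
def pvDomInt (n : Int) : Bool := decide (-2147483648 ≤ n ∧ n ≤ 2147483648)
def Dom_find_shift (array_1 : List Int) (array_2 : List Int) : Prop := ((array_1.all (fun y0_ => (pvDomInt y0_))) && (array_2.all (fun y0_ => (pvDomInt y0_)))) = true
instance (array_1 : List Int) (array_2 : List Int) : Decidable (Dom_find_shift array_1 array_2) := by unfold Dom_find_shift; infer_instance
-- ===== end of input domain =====

-- B replaces A's try-every-rotation-by-slicing loop with a KMP search of array_1 in
-- array_2 ++ array_2 that keeps the last occurrence (objective: faster).

-- ===== PORT A =====
-- while shift < len(array_1): start_index = len(array_1) - shift;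
-- modified_array_2 = array_2[start_index:] + array_2[:start_index]; compare; shift += 1
def find_shift_go (array_1 : List Int) (array_2 : List Int) (shift : Nat) : Int :=
  if shift < array_1.length then
    if array_1 =
        PySem.List.slice array_2 (some ((array_1.length : Int) - (shift : Int))) none ++
        PySem.List.slice array_2 none (some ((array_1.length : Int) - (shift : Int))) then
      (shift : Int)
    else find_shift_go array_1 array_2 (shift + 1)
  else -1
termination_by array_1.length - shift

def find_shift (array_1 : List Int) (array_2 : List Int) : Int :=
  find_shift_go array_1 array_2 0

-- ===== PORT B =====
-- while k > 0 and c != P[k]: k = fail[k-1]   (fuel = the starting k; the failure links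
-- built below strictly decrease, so k iterations always suffice: same result as Python)
def kmpDescend (P : List Int) (fail : List Nat) (c : Int) : Nat → Nat → Nat
  | 0, k => k
  | fuel+1, k =>
      if 0 < k ∧ P.getD k 0 ≠ c then kmpDescend P fail c fuel (fail.getD (k-1) 0) else k

-- the while loop followed by `if c == P[k]: k += 1`
def kmpStep (P : List Int) (fail : List Nat) (j : Nat) (c : Int) : Nat :=
  let k := kmpDescend P fail c j j
  if P.getD k 0 = c then k + 1 else k

-- fail = [0]*n; for i in range(1, n): …; fail[i] = k   (entries written left to right)
def pvFailStep (P : List Int) (st : List Nat × Nat) (i : Nat) : List Nat × Nat :=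
  let k := kmpStep P st.1 st.2 (P.getD i 0)
  (st.1 ++ [k], k)

def buildFail (P : List Int) : List Nat :=
  ((List.range' 1 (P.length - 1)).foldl (pvFailStep P) ([0], 0)).1

-- for i, x in enumerate(array_2 + array_2): …; if j == n: last = i - n + 1; j = fail[n-1]
-- state = (i, j, last)
def kmpScanStep (P : List Int) (fail : List Nat) (n : Nat) (st : Nat × Nat × Int) (x : Int) :
    Nat × Nat × Int :=
  let j := kmpStep P fail st.2.1 x
  if j = n then (st.1 + 1, fail.getD (n-1) 0, (st.1 : Int) - (n : Int) + 1)
  else (st.1 + 1, j, st.2.2)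

def find_shift_alt (array_1 : List Int) (array_2 : List Int) : Int :=
  let n := array_1.length
  if n = 0 ∨ array_2.length ≠ n then -1
  else
    let fail := buildFail array_1
    let st := (array_2 ++ array_2).foldl (kmpScanStep array_1 fail n) (0, 0, -1)
    if st.2.2 = -1 then -1 else (n : Int) - st.2.2

-- ===== PRECONDITION & SPEC =====
def Spec_find_shift (array_1 : List Int) (array_2 : List Int) (out : Int) : Prop := out = find_shift_alt array_1 array_2
instance (array_1 : List Int) (array_2 : List Int) (out : Int) : Decidable (Spec_find_shift array_1 array_2 out) := by unfold Spec_find_shift; infer_instance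

-- ===== CLAIM (what is proved, stated in full; the proofs are below) =====
def Claim_equal_find_shift : Prop := ∀ (array_1 : List Int) (array_2 : List Int), Dom_find_shift array_1 array_2 → Spec_find_shift array_1 array_2 (find_shift array_1 array_2)

-- ===== LEMMAS AND PROOFS =====

-- largest b < B with P.take b a suffix of w (0 if none; b = 0 always qualifies when 0 < B)
def pvMaxS (P w : List Int) (B : Nat) : Nat :=
  Nat.findGreatest (fun b => b < B ∧ P.take b <:+ w) B

theorem pvMaxS_mem (P w : List Int) (B : Nat) (hB : 0 < B) :
    pvMaxS P w B < B ∧ P.take (pvMaxS P w B) <:+ w := by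
  by_cases h : pvMaxS P w B = 0
  · rw [h]; exact ⟨hB, by simp⟩
  · exact (Nat.findGreatest_eq_iff.1 (rfl : pvMaxS P w B = pvMaxS P w B)).2.1 h

theorem le_pvMaxS (P w : List Int) (B b : Nat) (hb : b < B) (hs : P.take b <:+ w) :
    b ≤ pvMaxS P w B :=
  Nat.le_findGreatest (Nat.le_of_lt hb) ⟨hb, hs⟩

theorem pvMaxS_le (P w : List Int) (B : Nat) : pvMaxS P w B ≤ B :=
  Nat.findGreatest_le B

-- a shorter prefix-suffix of w is a suffix of a longer prefix-suffix of w
theorem pvSufSuf (P w : List Int) (b k : Nat) (hk : k ≤ P.length)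
    (hbk : b ≤ k) (h1 : P.take b <:+ w) (h2 : P.take k <:+ w) : P.take b <:+ P.take k := by
  apply List.suffix_of_suffix_length_le h1 h2
  simp only [List.length_take]
  omega

theorem pvSnocSuffix_intro (u w : List Int) (c : Int) (h : u <:+ w) : u ++ [c] <:+ w ++ [c] := by
  obtain ⟨p, hp⟩ := h
  exact ⟨p, by rw [← List.append_assoc, hp]⟩

theorem pvSnocSuffix_elim (u w : List Int) (x c : Int) (h : u ++ [x] <:+ w ++ [c]) :
    x = c ∧ u <:+ w := by
  obtain ⟨p, hp⟩ := h
  rw [← List.append_assoc] at hp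
  have h2 := List.append_inj' hp rfl
  refine ⟨by simpa using h2.2, p, h2.1⟩

theorem pvTakeSucc (P : List Int) (b : Nat) (hb : b < P.length) :
    P.take (b+1) = P.take b ++ [P.getD b 0] := by
  rw [List.take_succ, List.getElem?_eq_getElem hb, List.getD_eq_getElem P 0 hb]
  rfl

-- ---------- the while loop: descends the failure chain to the best viable candidate ----------
theorem kmpDescend_correct (P : List Int) (fail : List Nat) (c : Int) (w : List Int) (B : Nat)
    (hB : B ≤ P.length) :
    ∀ fuel k, k ≤ fuel →
      (∀ i, i + 1 ≤ k → fail.getD i 0 = pvMaxS P (P.take (i+1)) (i+1)) →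
      k < B → P.take k <:+ w →
      (∀ b, b < B → P.take b <:+ w → P.getD b 0 = c → b ≤ k) →
      (kmpDescend P fail c fuel k < B ∧ P.take (kmpDescend P fail c fuel k) <:+ w) ∧
      (∀ b, b < B → P.take b <:+ w → P.getD b 0 = c → b ≤ kmpDescend P fail c fuel k) ∧
      (kmpDescend P fail c fuel k = 0 ∨ P.getD (kmpDescend P fail c fuel k) 0 = c) := by
  intro fuel
  induction fuel with
  | zero =>
      intro k hk hfail hkB hkw hmax
      have : k = 0 := by omega
      subst this
      exact ⟨⟨hkB, hkw⟩, hmax, Or.inl rfl⟩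
  | succ fuel ih =>
      intro k hk hfail hkB hkw hmax
      rw [kmpDescend]
      by_cases hcond : 0 < k ∧ P.getD k 0 ≠ c
      · rw [if_pos hcond]
        have hfk : fail.getD (k-1) 0 = pvMaxS P (P.take k) k := by
          have := hfail (k-1) (by omega)
          rwa [show k - 1 + 1 = k by omega] at this
        have hmem := pvMaxS_mem P (P.take k) k hcond.1
        have hk1lt : fail.getD (k-1) 0 < k := by rw [hfk]; exact hmem.1
        apply ih
        · omega
        · intro i hi; exact hfail i (by omega)
        · omega
        · exact List.IsSuffix.trans (by rw [hfk]; exact hmem.2) hkw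
        · intro b hbB hbw hbc
          have hbk : b ≤ k := hmax b hbB hbw hbc
          have hbne : b ≠ k := fun h => hcond.2 (h ▸ hbc)
          have hsub : P.take b <:+ P.take k := pvSufSuf P w b k (by omega) (by omega) hbw hkw
          rw [hfk]
          exact le_pvMaxS P (P.take k) k b (by omega) hsub
      · rw [if_neg hcond]
        refine ⟨⟨hkB, hkw⟩, hmax, ?_⟩
        by_cases hk0 : k = 0
        · exact Or.inl hk0
        · exact Or.inr (by push_neg at hcond; exact hcond (by omega))

-- one KMP step advances the invariant "j = longest prefix of P (< B) that suffixes w"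
theorem kmpStep_correct (P : List Int) (fail : List Nat) (c : Int) (w : List Int) (B : Nat)
    (hB0 : 0 < B) (hB : B ≤ P.length)
    (hfail : ∀ i, i + 1 < B → fail.getD i 0 = pvMaxS P (P.take (i+1)) (i+1)) :
    kmpStep P fail (pvMaxS P w B) c = pvMaxS P (w ++ [c]) (B + 1) := by
  have hmem := pvMaxS_mem P w B hB0
  have hdes := kmpDescend_correct P fail c w B hB (pvMaxS P w B) (pvMaxS P w B) le_rfl
    (fun i hi => hfail i (by have := hmem.1; omega)) hmem.1 hmem.2
    (fun b hbB hbw _ => le_pvMaxS P w B b hbB hbw)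
  set k := kmpDescend P fail c (pvMaxS P w B) (pvMaxS P w B) with hkdef
  obtain ⟨⟨hkB, hkw⟩, hkmax, hkstop⟩ := hdes
  rw [kmpStep]
  show (if P.getD k 0 = c then k + 1 else k) = pvMaxS P (w ++ [c]) (B + 1)
  by_cases hc : P.getD k 0 = c
  · rw [if_pos hc]
    apply le_antisymm
    · apply le_pvMaxS
      · omega
      · rw [pvTakeSucc P k (by omega), hc]
        exact pvSnocSuffix_intro _ _ _ hkw
    · by_cases hq : pvMaxS P (w ++ [c]) (B+1) = 0
      · omega
      · have hqmem := (Nat.findGreatest_eq_iff.1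
          (rfl : pvMaxS P (w ++ [c]) (B+1) = pvMaxS P (w ++ [c]) (B+1))).2.1 hq
        obtain ⟨hqB, hqs⟩ := hqmem
        generalize hgen : pvMaxS P (w ++ [c]) (B+1) = q at hq hqB hqs ⊢
        obtain ⟨b, rfl⟩ : ∃ b, q = b + 1 := ⟨q - 1, by omega⟩
        rw [pvTakeSucc P b (by omega)] at hqs
        have helim := pvSnocSuffix_elim _ _ _ _ hqs
        have hble := hkmax b (by omega) helim.2 helim.1
        omega
  · rw [if_neg hc]
    have hk0 : k = 0 := by rcases hkstop with h | h; exact h; exact absurd h hc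
    rw [hk0] at hc ⊢
    symm
    rw [pvMaxS, Nat.findGreatest_eq_zero_iff]
    intro m hm0 hmB hpred
    obtain ⟨b, rfl⟩ : ∃ b, m = b + 1 := ⟨m - 1, by omega⟩
    obtain ⟨hltB, hsfx⟩ := hpred
    rw [pvTakeSucc P b (by omega)] at hsfx
    have hel := pvSnocSuffix_elim _ _ _ _ hsfx
    have hb0 := hkmax b (by omega) hel.2 hel.1
    have hbz : b = 0 := by omega
    subst hbz
    exact hc hel.1

-- ---------- building the failure table ----------
theorem pvMaxS_bound_one (P w : List Int) : pvMaxS P w 1 = 0 := by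
  rw [pvMaxS]
  rw [show (1 : Nat) = 0 + 1 from rfl, Nat.findGreatest_of_not (by simp)]
  simp

def pvFailInv (P : List Int) (m : Nat) (st : List Nat × Nat) : Prop :=
  st.1.length = m ∧ (∀ i, i < m → st.1.getD i 0 = pvMaxS P (P.take (i+1)) (i+1)) ∧
  st.2 = pvMaxS P (P.take m) m

theorem pvGetD_append_left (l l' : List Nat) (i : Nat) (h : i < l.length) :
    (l ++ l').getD i 0 = l.getD i 0 := by
  rw [List.getD_eq_getElem?_getD, List.getD_eq_getElem?_getD, List.getElem?_append_left h]

theorem pvGetD_append_end (l : List Nat) (k : Nat) :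
    (l ++ [k]).getD l.length 0 = k := by
  rw [List.getD_eq_getElem?_getD, List.getElem?_append_right le_rfl]
  simp

theorem pvFailStep_inv (P : List Int) (i : Nat) (st : List Nat × Nat)
    (h1 : 1 ≤ i) (hi : i < P.length) (hinv : pvFailInv P i st) :
    pvFailInv P (i+1) (pvFailStep P st i) := by
  obtain ⟨hlen, hentries, hst2⟩ := hinv
  have hstep : kmpStep P st.1 st.2 (P.getD i 0) = pvMaxS P (P.take (i+1)) (i+1) := by
    rw [hst2, kmpStep_correct P st.1 (P.getD i 0) (P.take i) i h1 (by omega)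
      (fun i' hi' => hentries i' (by omega)), ← pvTakeSucc P i hi]
  have hval : pvFailStep P st i =
      (st.1 ++ [pvMaxS P (P.take (i+1)) (i+1)], pvMaxS P (P.take (i+1)) (i+1)) := by
    show (st.1 ++ [kmpStep P st.1 st.2 (P.getD i 0)], kmpStep P st.1 st.2 (P.getD i 0)) = _
    rw [hstep]
  rw [hval]
  refine ⟨by simp [hlen], ?_, rfl⟩
  intro i' hi'
  by_cases h : i' < i
  · rw [pvGetD_append_left _ _ _ (by omega)]
    exact hentries i' h
  · have hii : i' = i := by omega
    subst hii
    have he := pvGetD_append_end st.1 (pvMaxS P (P.take (i'+1)) (i'+1))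
    rw [hlen] at he
    exact he

theorem pvFailFold (P : List Int) :
    ∀ cnt start st, 1 ≤ start → start + cnt = P.length → pvFailInv P start st →
      pvFailInv P P.length ((List.range' start cnt).foldl (pvFailStep P) st) := by
  intro cnt
  induction cnt with
  | zero =>
      intro start st h1 hsum hinv
      simp only [List.range', List.foldl_nil]
      rwa [show start = P.length by omega] at hinv
  | succ cnt ih =>
      intro start st h1 hsum hinv
      rw [List.range'_succ, List.foldl_cons]
      exact ih (start+1) _ (by omega) (by omega)
        (pvFailStep_inv P start st h1 (by omega) hinv)

theorem pvBuildFail (P : List Int) (hn : 0 < P.length) :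
    ∀ i, i < P.length → (buildFail P).getD i 0 = pvMaxS P (P.take (i+1)) (i+1) := by
  have hbase : pvFailInv P 1 ([0], 0) := by
    refine ⟨rfl, ?_, by simp [pvMaxS_bound_one]⟩
    intro i hi
    have : i = 0 := by omega
    subst this
    simp [pvMaxS_bound_one]
  have := pvFailFold P (P.length - 1) 1 ([0], 0) le_rfl (by omega) hbase
  exact fun i hi => this.2.1 i hi

-- ---------- the scan over array_2 ++ array_2 ----------
-- last = encoded position of the latest full match end in w (-1 if none)
def pvLastInv (P w : List Int) (last : Int) : Prop :=
  (last = -1 ∧ ∀ e, 0 < e → e ≤ w.length → ¬ P <:+ w.take e) ∨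
  (∃ e, 0 < e ∧ e ≤ w.length ∧ P <:+ w.take e ∧ last = (e : Int) - (P.length : Int) ∧
    ∀ e', e < e' → e' ≤ w.length → ¬ P <:+ w.take e')

def pvScanInv (P : List Int) (fail : List Nat) (w : List Int) (st : Nat × Nat × Int) : Prop :=
  st.1 = w.length ∧ st.2.1 = pvMaxS P w P.length ∧ pvLastInv P w st.2.2

theorem pvReset (P u : List Int) (hn : 0 < P.length) (h : P <:+ u) :
    pvMaxS P u P.length = pvMaxS P P P.length := by
  apply le_antisymm
  · have hmem := pvMaxS_mem P u P.length hn
    apply le_pvMaxS P P P.length _ hmem.1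
    apply List.suffix_of_suffix_length_le hmem.2 h
    simp only [List.length_take]; omega
  · have hmem := pvMaxS_mem P P P.length hn
    exact le_pvMaxS P u P.length _ hmem.1 (List.IsSuffix.trans hmem.2 h)

theorem pvDropBound (P u : List Int) (hn : 0 < P.length)
    (h : pvMaxS P u (P.length + 1) ≠ P.length) :
    pvMaxS P u (P.length + 1) = pvMaxS P u P.length := by
  apply le_antisymm
  · have hmem := pvMaxS_mem P u (P.length + 1) (by omega)
    exact le_pvMaxS P u P.length _ (by have := hmem.1; omega) hmem.2
  · have hmem := pvMaxS_mem P u P.length hn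
    exact le_pvMaxS P u (P.length + 1) _ (by omega) hmem.2

theorem pvMatchIff (P u : List Int) (hn : 0 < P.length) :
    pvMaxS P u (P.length + 1) = P.length ↔ P <:+ u := by
  constructor
  · intro h
    have := (Nat.findGreatest_eq_iff.1 h).2.1 (by omega)
    rw [List.take_length] at this
    exact this.2
  · intro h
    have hge : P.length ≤ pvMaxS P u (P.length + 1) :=
      le_pvMaxS P u (P.length + 1) P.length (by omega) (by rwa [List.take_length])
    have hle := pvMaxS_le P u (P.length + 1)
    rcases Nat.lt_or_ge (pvMaxS P u (P.length + 1)) (P.length + 1) with h' | h'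
    · omega
    · have heq : pvMaxS P u (P.length + 1) = P.length + 1 := by omega
      have := (Nat.findGreatest_eq_iff.1 heq).2.1 (by omega)
      omega

theorem pvMaxS_nil (P : List Int) (hn : 0 < P.length) : pvMaxS P [] P.length = 0 := by
  rw [pvMaxS, Nat.findGreatest_eq_zero_iff]
  intro m hm0 hmB hpred
  have := List.IsSuffix.length_le hpred.2
  simp only [List.length_take, List.length_nil] at this
  omega

theorem pvScanStep_inv (P : List Int) (fail : List Nat) (hn : 0 < P.length)
    (hfail : ∀ i, i < P.length → fail.getD i 0 = pvMaxS P (P.take (i+1)) (i+1))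
    (w : List Int) (c : Int) (st : Nat × Nat × Int) (hinv : pvScanInv P fail w st) :
    pvScanInv P fail (w ++ [c]) (kmpScanStep P fail P.length st c) := by
  obtain ⟨hlen, hj, hlast⟩ := hinv
  have hstep : kmpStep P fail st.2.1 c = pvMaxS P (w ++ [c]) (P.length + 1) := by
    rw [hj]
    exact kmpStep_correct P fail c w P.length hn le_rfl (fun i hi => hfail i (by omega))
  rw [kmpScanStep]
  simp only [hstep]
  by_cases hm : pvMaxS P (w ++ [c]) (P.length + 1) = P.length
  · rw [if_pos hm]
    have hsfx : P <:+ w ++ [c] := (pvMatchIff P (w ++ [c]) hn).1 hm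
    refine ⟨by simp [hlen], ?_, ?_⟩
    · have h1 : fail.getD (P.length - 1) 0 = pvMaxS P (P.take (P.length - 1 + 1)) (P.length - 1 + 1) :=
        hfail (P.length - 1) (by omega)
      rw [show P.length - 1 + 1 = P.length by omega, List.take_length] at h1
      simp only [h1]
      exact (pvReset P (w ++ [c]) hn hsfx).symm
    · right
      refine ⟨w.length + 1, by omega, by simp, ?_, ?_, ?_⟩
      · rw [show w.length + 1 = (w ++ [c]).length by simp, List.take_length]
        exact hsfx
      · rw [hlen]; push_cast; ring
      · intro e' h1 h2
        simp only [List.length_append, List.length_cons, List.length_nil] at h2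
        omega
  · rw [if_neg hm]
    have hnomatch : ¬ P <:+ w ++ [c] := fun h => hm ((pvMatchIff P (w ++ [c]) hn).2 h)
    refine ⟨by simp [hlen], by rw [pvDropBound P (w ++ [c]) hn hm], ?_⟩
    have htake : ∀ e, e ≤ w.length → (w ++ [c]).take e = w.take e := by
      intro e he
      rw [List.take_append_of_le_length he]
    have htop : (w ++ [c]).take (w.length + 1) = w ++ [c] := by
      rw [show w.length + 1 = (w ++ [c]).length by simp, List.take_length]
    rcases hlast with ⟨h1, h2⟩ | ⟨e, he0, hele, hmm, hl, hmax⟩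
    · left
      refine ⟨h1, ?_⟩
      intro e he hle
      simp only [List.length_append, List.length_cons, List.length_nil] at hle
      rcases Nat.lt_or_ge e (w.length + 1) with h' | h'
      · rw [htake e (by omega)]; exact h2 e he (by omega)
      · rw [show e = w.length + 1 by omega, htop]; exact hnomatch
    · right
      refine ⟨e, he0, by simp; omega, by rw [htake e hele]; exact hmm, hl, ?_⟩
      intro e' h1 h2
      simp only [List.length_append, List.length_cons, List.length_nil] at h2
      rcases Nat.lt_or_ge e' (w.length + 1) with h' | h'
      · rw [htake e' (by omega)]; exact hmax e' h1 (by omega)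
      · rw [show e' = w.length + 1 by omega, htop]; exact hnomatch

theorem pvScanFold (P : List Int) (fail : List Nat) (hn : 0 < P.length)
    (hfail : ∀ i, i < P.length → fail.getD i 0 = pvMaxS P (P.take (i+1)) (i+1)) :
    ∀ t w st, pvScanInv P fail w st →
      pvScanInv P fail (w ++ t) (t.foldl (kmpScanStep P fail P.length) st) := by
  intro t
  induction t with
  | nil => intro w st h; simpa using h
  | cons c t ih =>
      intro w st h
      rw [List.foldl_cons, show w ++ c :: t = (w ++ [c]) ++ t by simp]
      exact ih (w ++ [c]) _ (pvScanStep_inv P fail hn hfail w c st h)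

-- ---------- A's loop: first matching rotation scanning shifts upward ----------
-- A returns -1 forever when the lengths differ
theorem find_shift_go_ne (array_1 array_2 : List Int) (h : array_2.length ≠ array_1.length) :
    ∀ shift, find_shift_go array_1 array_2 shift = -1 := by
  have H : ∀ m shift, array_1.length - shift = m → find_shift_go array_1 array_2 shift = -1 := by
    intro m
    induction m using Nat.strong_induction_on with
    | _ m ih =>
      intro shift hm
      rw [find_shift_go]
      by_cases h1 : shift < array_1.length
      · rw [if_pos h1]
        have hcast : ((array_1.length : Int) - (shift : Int)) = ((array_1.length - shift : Nat) : Int) := by omega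
        rw [hcast, PySem.List.slice_from_natCast, PySem.List.slice_to_natCast]
        rw [if_neg ?_]
        · exact ih (array_1.length - (shift + 1)) (by omega) (shift + 1) rfl
        · intro hEq
          have hL := congrArg List.length hEq
          simp only [List.length_append, List.length_drop, List.length_take] at hL
          omega
      · rw [if_neg h1]
  exact fun shift => H _ shift rfl

-- largest rotation offset p ≤ b, p ≥ 1, with array_1 = array_2 rotated left by p
def pvAmax (a1 a2 : List Int) (b : Nat) : Nat :=
  Nat.findGreatest (fun p => 0 < p ∧ a1 = a2.drop p ++ a2.take p) b

theorem pvA_char (a1 a2 : List Int) :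
    ∀ s, s ≤ a1.length → find_shift_go a1 a2 s =
      (if 0 < pvAmax a1 a2 (a1.length - s) then
        (a1.length : Int) - (pvAmax a1 a2 (a1.length - s) : Int) else -1) := by
  have H : ∀ m s, s ≤ a1.length → a1.length - s = m → find_shift_go a1 a2 s =
      (if 0 < pvAmax a1 a2 (a1.length - s) then
        (a1.length : Int) - (pvAmax a1 a2 (a1.length - s) : Int) else -1) := by
    intro m
    induction m using Nat.strong_induction_on with
    | _ m ih =>
      intro s hs hm
      rw [find_shift_go]
      by_cases h1 : s < a1.length
      · rw [if_pos h1]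
        have hcast : ((a1.length : Int) - (s : Int)) = ((a1.length - s : Nat) : Int) := by omega
        rw [hcast, PySem.List.slice_from_natCast, PySem.List.slice_to_natCast]
        by_cases heq : a1 = a2.drop (a1.length - s) ++ a2.take (a1.length - s)
        · rw [if_pos heq]
          have hfg : pvAmax a1 a2 (a1.length - s) = a1.length - s :=
            Nat.findGreatest_eq ⟨by omega, heq⟩
          rw [hfg, if_pos (by omega)]
          omega
        · rw [if_neg heq]
          have hstep : pvAmax a1 a2 (a1.length - s) = pvAmax a1 a2 (a1.length - (s+1)) := by
            rw [pvAmax, pvAmax, show a1.length - s = (a1.length - (s+1)) + 1 by omega]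
            rw [Nat.findGreatest_of_not (by
              rw [show a1.length - (s+1) + 1 = a1.length - s by omega]
              exact fun hc => heq hc.2)]
          rw [hstep] at *
          rw [ih (a1.length - (s+1)) (by omega) (s+1) (by omega) rfl]
      · rw [if_neg h1]
        rw [show a1.length - s = 0 by omega]
        simp [pvAmax]
  exact fun s hs => H _ s hs rfl

-- a full match of array_1 ending at position p + n in array_2 ++ array_2 is exactly
-- the rotation-by-p equality that A tests
theorem pvRotIff (a1 a2 : List Int) (p : Nat) (hp : p ≤ a1.length)
    (hlen : a2.length = a1.length) :
    (a1 <:+ (a2 ++ a2).take (p + a1.length) ↔ a1 = a2.drop p ++ a2.take p) := by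
  have hlu : ((a2 ++ a2).take (p + a1.length)).length = p + a1.length := by
    simp only [List.length_take, List.length_append]
    omega
  rw [List.suffix_iff_eq_drop, hlu]
  have hdrop : ((a2 ++ a2).take (p + a1.length)).drop (p + a1.length - a1.length) =
      a2.drop p ++ a2.take p := by
    rw [show p + a1.length - a1.length = p by omega]
    rw [List.drop_take]
    rw [List.drop_append_of_le_length (by omega)]
    rw [show p + a1.length - p = a1.length from by omega]
    rw [List.take_append]
    rw [List.take_of_length_le (by simp; omega)]
    congr 1
    congr 1
    simp only [List.length_drop]
    omega
  rw [hdrop]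

theorem pvAmZero (a1 a2 : List Int) (hlen : a2.length = a1.length) :
    (a1 = a2.drop 0 ++ a2.take 0) ↔ (a1 = a2.drop a1.length ++ a2.take a1.length) := by
  rw [List.drop_zero, List.take_zero, List.append_nil,
      List.drop_of_length_le (by omega), List.take_of_length_le (by omega)]
  simp

-- ===== VERDICT helper: main equality =====
theorem pv_main (a1 a2 : List Int) : find_shift a1 a2 = find_shift_alt a1 a2 := by
  rw [find_shift, find_shift_alt]
  by_cases h0 : a1.length = 0 ∨ a2.length ≠ a1.length
  · simp only []
    rw [if_pos h0]
    rcases h0 with h | h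
    · rw [find_shift_go]
      rw [if_neg (by omega)]
    · exact find_shift_go_ne a1 a2 h 0
  · push_neg at h0
    obtain ⟨hn0, hlen⟩ := h0
    have hn : 0 < a1.length := by omega
    simp only []
    rw [if_neg (by push_neg; exact ⟨hn0, hlen⟩)]
    have hfail := pvBuildFail a1 hn
    have hbase : pvScanInv a1 (buildFail a1) [] (0, 0, -1) := by
      refine ⟨rfl, by rw [pvMaxS_nil a1 hn], Or.inl ⟨rfl, ?_⟩⟩
      intro e he hle
      simp at hle
      omega
    have hscan := pvScanFold a1 (buildFail a1) hn hfail (a2 ++ a2) [] (0, 0, -1) hbase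
    rw [List.nil_append] at hscan
    obtain ⟨-, -, hlast⟩ := hscan
    set st := (a2 ++ a2).foldl (kmpScanStep a1 (buildFail a1) a1.length) (0, 0, -1) with hstdef
    rw [pvA_char a1 a2 0 (by omega)]
    simp only [Nat.sub_zero]
    rcases hlast with ⟨hl1, hnone⟩ | ⟨e, he0, hele, hmm, hl, hmax⟩
    · rw [hl1, if_pos rfl]
      have hz : pvAmax a1 a2 a1.length = 0 := by
        rw [pvAmax, Nat.findGreatest_eq_zero_iff]
        intro p hp0 hpb hpred
        have := (pvRotIff a1 a2 p hpb hlen).2 hpred.2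
        exact hnone (p + a1.length) (by omega) (by simp; omega) this
      rw [hz, if_neg (by omega)]
    · have hte : a1.length ≤ e := by
        have h1 := List.IsSuffix.length_le hmm
        simp only [List.length_take] at h1
        omega
      have he2 : e ≤ 2 * a1.length := by
        simp only [List.length_append] at hele
        omega
      set p := e - a1.length with hpdef
      have hep : e = p + a1.length := by omega
      have hpn : p ≤ a1.length := by omega
      have hrot : a1 = a2.drop p ++ a2.take p := by
        rw [← pvRotIff a1 a2 p hpn hlen, ← hep]
        exact hmm
      have hp1 : 1 ≤ p := by
        by_contra hc
        have hp0 : p = 0 := by omega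
        have hrotn : a1 = a2.drop a1.length ++ a2.take a1.length :=
          (pvAmZero a1 a2 hlen).1 (by rwa [hp0] at hrot)
        have hm2 : a1 <:+ (a2 ++ a2).take (a1.length + a1.length) :=
          (pvRotIff a1 a2 a1.length le_rfl hlen).2 hrotn
        exact hmax (a1.length + a1.length) (by omega) (by simp; omega) hm2
      have hamax : pvAmax a1 a2 a1.length = p := by
        apply le_antisymm
        · set q := pvAmax a1 a2 a1.length with hqdef
          by_cases hq0 : q = 0
          · omega
          · have hqmem := (Nat.findGreatest_eq_iff.1 hqdef.symm).2.1 hq0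
            have hqle : q ≤ a1.length := Nat.findGreatest_le a1.length
            by_contra hc
            push_neg at hc
            have hmq : a1 <:+ (a2 ++ a2).take (q + a1.length) :=
              (pvRotIff a1 a2 q hqle hlen).2 hqmem.2
            exact hmax (q + a1.length) (by omega) (by simp; omega) hmq
        · exact Nat.le_findGreatest hpn ⟨by omega, hrot⟩
      have hlp : st.2.2 = (p : Int) := by
        rw [hl, hep]; push_cast; ring
      rw [hamax, hlp]
      rw [if_pos (show 0 < p by omega), if_neg (show ¬(p : Int) = -1 by omega)]

-- ===== VERDICT (by name: the statement is the Claim_ definition above) =====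
theorem find_shift_spec : Claim_equal_find_shift := by
  intro a1 a2 _
  exact pv_main a1 a2
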